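-- pv_equiv track=rewrite | github.com/eolandro/IAAGO2025 | Tema3/AP/R004/reinas.py | imprimir_solucion
-- ===== SOURCE A (Python) =====
-- def imprimir_solucion(solucion, n):
--     tablero_str = ""
--     for fila in range(n):
--         linea = ""
--         for col in range(n):
--             if solucion[fila] == col:
--                 linea += " 1 "
--             else:
--                 linea += " 0 "
--         tablero_str += linea + "\n"
--     return tablero_str
-- ===== SOURCE B (Python) =====
-- def imprimir_solucion(solucion, n):
--     def fila_str(p):
--         if 0 <= p < n:
--             return " 0 " * p + " 1 " + " 0 " * (n - p - 1)
--         return " 0 " * n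
--     return "".join(fila_str(solucion[fila]) + "\n" for fila in range(n))
-- ===== Notes on version B (the rewrite author's own statement) =====
-- stated objective: simpler
-- what changed: Each row is built in closed form by string repetition (' 0 '*p + ' 1 ' + ' 0 '*(n-p-1), or ' 0 '*n when the queen column is out of range) instead of an inner per-column loop with a per-cell branch and quadratic += concatenation.
import Mathlib
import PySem

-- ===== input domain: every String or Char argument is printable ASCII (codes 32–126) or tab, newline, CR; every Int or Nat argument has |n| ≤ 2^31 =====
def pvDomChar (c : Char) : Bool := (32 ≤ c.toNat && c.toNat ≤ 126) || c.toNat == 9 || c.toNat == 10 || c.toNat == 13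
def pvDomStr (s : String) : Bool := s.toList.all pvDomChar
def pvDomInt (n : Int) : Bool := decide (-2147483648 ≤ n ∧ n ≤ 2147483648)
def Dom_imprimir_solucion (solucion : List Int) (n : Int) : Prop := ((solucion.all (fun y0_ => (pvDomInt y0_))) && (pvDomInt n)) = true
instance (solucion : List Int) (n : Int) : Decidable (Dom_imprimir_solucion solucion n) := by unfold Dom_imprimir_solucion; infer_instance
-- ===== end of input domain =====

-- B builds each row in closed form by repetition (' 0 '*p + ' 1 ' + ' 0 '*(n-p-1))
-- instead of A's inner per-column loop with a branch at every cell; objective: simpler.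


-- ===== PORT A =====
-- inner loop: linea = ""; for col in range(n): linea += " 1 "/" 0 "   (over List Char)
def lineaA (p : Int) (n : Int) : List Char :=
  (PySem.List.pyRange 0 n 1).foldl
    (fun linea col => if p == col then linea ++ [' ', '1', ' '] else linea ++ [' ', '0', ' ']) []

def imprimir_solucion (solucion : List Int) (n : Int) : String :=
  String.ofList <|
    (PySem.List.pyRange 0 n 1).foldl
      (fun tablero fila => tablero ++ (lineaA (PySem.List.pyGetD solucion fila 0) n ++ ['\n'])) []

-- ===== PORT B =====
-- " 0 " * k  (Python string repetition; negative k gives "")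
def zerosB (k : Int) : List Char := (List.replicate k.toNat [' ', '0', ' ']).flatten

-- fila_str(p): closed-form row
def filaStrB (p : Int) (n : Int) : List Char :=
  if 0 ≤ p ∧ p < n then zerosB p ++ [' ', '1', ' '] ++ zerosB (n - p - 1) else zerosB n

def imprimir_solucion_alt (solucion : List Int) (n : Int) : String :=
  String.ofList <|
    ((PySem.List.pyRange 0 n 1).map
      (fun fila => filaStrB (PySem.List.pyGetD solucion fila 0) n ++ ['\n'])).flatten

-- ===== PRECONDITION & SPEC =====
-- Python A (and B) raise IndexError at solucion[fila] when n exceeds len(solucion).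
def Pre_imprimir_solucion (solucion : List Int) (n : Int) : Prop :=
  n ≤ PySem.List.len solucion
instance (solucion : List Int) (n : Int) : Decidable (Pre_imprimir_solucion solucion n) := by
  unfold Pre_imprimir_solucion; infer_instance

def pvWitness_imprimir_solucion : List Int × Int := ([1, 3, 0, 2], 4)

def Spec_imprimir_solucion (solucion : List Int) (n : Int) (out : String) : Prop := out = imprimir_solucion_alt solucion n
instance (solucion : List Int) (n : Int) (out : String) : Decidable (Spec_imprimir_solucion solucion n out) := by unfold Spec_imprimir_solucion; infer_instance

-- ===== CLAIM (what is proved, stated in full; the proofs are below) =====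
def Claim_equal_imprimir_solucion : Prop := ∀ (solucion : List Int) (n : Int), Dom_imprimir_solucion solucion n → Pre_imprimir_solucion solucion n → Spec_imprimir_solucion solucion n (imprimir_solucion solucion n)

-- ===== LEMMAS AND PROOFS =====

lemma zerosB_succ (m : Nat) : zerosB ((m : Int) + 1) = zerosB m ++ [' ', '0', ' '] := by
  simp [zerosB, List.replicate_succ']

-- A's per-cell inner loop equals B's closed-form row
lemma linea_eq_fila (p : Int) (n : Int) : lineaA p n = filaStrB p n := by
  rcases Decidable.em (n ≤ 0) with hn | hn
  · rw [filaStrB, if_neg (by omega)]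
    simp [lineaA, zerosB, PySem.List.pyRange_one_eq_nil hn, (by omega : n.toNat = 0)]
  · obtain ⟨m, rfl⟩ : ∃ m : Nat, n = (m : Int) := ⟨n.toNat, by omega⟩
    induction m with
    | zero => simp at hn
    | succ k ih =>
      have hk : (0:Int) ≤ (k : Int) := by positivity
      have step : lineaA p ((k:Int) + 1)
          = lineaA p k ++ (if p == (k:Int) then [' ', '1', ' '] else [' ', '0', ' ']) := by
        rw [lineaA, lineaA, PySem.List.pyRange_one_succ_right hk, List.foldl_append]
        simp only [List.foldl_cons, List.foldl_nil]
        split <;> rfl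
      have hcast : ((k + 1 : Nat) : Int) = (k : Int) + 1 := by push_cast; ring
      rw [hcast, step]
      rcases Decidable.em ((k:Int) ≤ 0) with hk0 | hk0
      · have hk' : k = 0 := by omega
        subst hk'
        have hempty : lineaA p ((0:Nat):Int) = [] := by
          simp [lineaA, PySem.List.pyRange_one_eq_nil]
        rw [hempty, List.nil_append]
        by_cases hp : p = 0
        · subst hp
          rw [if_pos (by simp), filaStrB, if_pos (by constructor <;> omega)]
          have h0 : ((0:Nat):Int) + 1 - 0 - 1 = 0 := by omega
          rw [h0]
          simp [zerosB]
        · rw [if_neg (by simpa using hp), filaStrB, if_neg (by omega)]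
          simp [zerosB]
      · rw [ih hk0]
        by_cases hpk : p = (k : Int)
        · subst hpk
          rw [if_pos (by simp), filaStrB, filaStrB, if_neg (by omega),
            if_pos (by constructor <;> omega)]
          have h0 : (k:Int) + 1 - (k:Int) - 1 = 0 := by omega
          rw [h0]
          simp [zerosB]
        · rw [if_neg (by simpa using hpk), filaStrB, filaStrB]
          by_cases hlt : 0 ≤ p ∧ p < (k : Int)
          · rw [if_pos hlt, if_pos (by constructor <;> omega)]
            have h1 : (k:Int) - p - 1 = ((k - p.toNat - 1 : Nat) : Int) := by omega
            have h2 : (k:Int) + 1 - p - 1 = ((k - p.toNat - 1 : Nat) : Int) + 1 := by omega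
            rw [h1, h2, zerosB_succ]
            simp
          · rw [if_neg hlt, if_neg (by omega), zerosB_succ]

-- A's outer accumulation is the flattening of the per-row map
lemma tablero_eq (solucion : List Int) (n : Int) :
    imprimir_solucion solucion n = imprimir_solucion_alt solucion n := by
  unfold imprimir_solucion imprimir_solucion_alt
  rw [PySem.List.foldl_append_eq_flatMap]
  simp only [List.nil_append, List.flatMap_def]
  congr 2
  exact List.map_congr_left fun fila _ => by rw [linea_eq_fila]

-- ===== VERDICT (by name: the statement is the Claim_ definition above) =====
theorem imprimir_solucion_spec : Claim_equal_imprimir_solucion := by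
  intro solucion n _ _
  exact tablero_eq solucion n
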